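-- pv_equiv track=rewrite | github.com/JasonRWood/Wood_Ashby_2023 | src/zero_finder/zero_finder_utilities.py | population_boundaries
-- ===== SOURCE A (Python) =====
-- def population_boundaries(H_mat):
--
--     H_plotting_sigma = []
--     H_plotting_alpha = []
--     for i, row in enumerate(H_mat):
--         down = -1 * (i != 0)
--         up = 1 * (i != (len(H_mat) - 1))
--         i_vec = [down, 0, up]
--         for j, val in enumerate(row):
--             left = -1 * (j != 0)
--             right = 1 * (j != (len(row) - 1))
--             j_vec = [left, 0, right]
--             H_sum = 0
--             for ii in i_vec:
--                 for jj in j_vec: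
--                     if ii != 0 and jj != 0:
--                         H_sum += H_mat[i + ii][j + jj]
--
--             if val == 0 and H_sum != 0:
--                 H_plotting_alpha.append(i)
--                 H_plotting_sigma.append(j)
--
--     return H_plotting_alpha, H_plotting_sigma
-- ===== SOURCE B (Python) =====
-- def population_boundaries(H_mat):
--     n = len(H_mat)
--     # scatter pass: each cell adds its value to the accumulator of every
--     # in-bounds diagonal neighbour
--     acc = {}
--     for i, row in enumerate(H_mat):
--         for j, v in enumerate(row):
--             for x in (i - 1, i + 1):
--                 for y in (j - 1, j + 1):
--                     if 0 <= x < n and 0 <= y < len(H_mat[x]):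
--                         acc[(x, y)] = acc.get((x, y), 0) + v
--     H_plotting_sigma = []
--     H_plotting_alpha = []
--     for i, row in enumerate(H_mat):
--         for j, v in enumerate(row):
--             if v == 0 and acc.get((i, j), 0) != 0:
--                 H_plotting_alpha.append(i)
--                 H_plotting_sigma.append(j)
--     return H_plotting_alpha, H_plotting_sigma
-- ===== Notes on version B (the rewrite author's own statement) =====
-- stated objective: alternative
-- what changed: B replaces A's per-cell gather of diagonal neighbours (with its i_vec/j_vec offset machinery) by a scatter pass that adds each cell's value into a dict accumulator of its in-bounds diagonal neighbours, then a second pass appends each zero cell whose accumulated diagonal sum is nonzero.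
import Mathlib
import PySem

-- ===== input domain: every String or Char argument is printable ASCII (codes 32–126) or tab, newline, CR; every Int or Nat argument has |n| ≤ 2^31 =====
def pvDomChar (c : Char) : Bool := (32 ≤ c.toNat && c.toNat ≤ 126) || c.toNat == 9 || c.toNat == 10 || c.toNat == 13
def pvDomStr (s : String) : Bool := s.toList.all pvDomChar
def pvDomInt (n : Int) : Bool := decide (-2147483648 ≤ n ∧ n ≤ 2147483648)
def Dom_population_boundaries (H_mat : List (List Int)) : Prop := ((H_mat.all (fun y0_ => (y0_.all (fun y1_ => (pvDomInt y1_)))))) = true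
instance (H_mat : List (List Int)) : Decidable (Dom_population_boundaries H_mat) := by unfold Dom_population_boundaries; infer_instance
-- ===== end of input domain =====

-- B replaces A's per-cell gather of diagonal neighbours by a scatter pass into a dict accumulator
-- plus a second pass over the zero cells (alternative decomposition, same asymptotic cost).

-- ===== PORT A =====
-- The neighbour reads H_mat[i+ii][j+jj] are ported with the total pyGetD form:
-- Pre_ excludes exactly the inputs on which Python's indexing raises IndexError.
def pbHSum (H_mat : List (List Int)) (i j : Int) (i_vec j_vec : List Int) : Int :=
  i_vec.foldl (fun s ii =>
    j_vec.foldl (fun s jj =>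
      if ii ≠ 0 ∧ jj ≠ 0 then
        s + PySem.List.pyGetD (PySem.List.pyGetD H_mat (i + ii) []) (j + jj) 0
      else s) s) 0

def population_boundaries (H_mat : List (List Int)) : List Int × List Int :=
  (PySem.List.enumerate H_mat 0).foldl (fun st p =>
    let i := p.1
    let row := p.2
    let down : Int := if i ≠ 0 then -1 else 0
    let up : Int := if i ≠ (H_mat.length : Int) - 1 then 1 else 0
    let i_vec := [down, 0, up]
    (PySem.List.enumerate row 0).foldl (fun st q =>
      let j := q.1
      let left : Int := if j ≠ 0 then -1 else 0
      let right : Int := if j ≠ (row.length : Int) - 1 then 1 else 0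
      let j_vec := [left, 0, right]
      let H_sum := pbHSum H_mat i j i_vec j_vec
      if q.2 = 0 ∧ H_sum ≠ 0 then (st.1 ++ [i], st.2 ++ [j]) else st) st)
    (([], []) : List Int × List Int)

-- ===== PORT B =====
def pbScatterCell (H_mat : List (List Int)) (acc : PySem.Dict (Int × Int) Int)
    (i j v : Int) : PySem.Dict (Int × Int) Int :=
  [i - 1, i + 1].foldl (fun acc x =>
    [j - 1, j + 1].foldl (fun acc y =>
      if 0 ≤ x ∧ x < (H_mat.length : Int) ∧ 0 ≤ y ∧ y < ((PySem.List.pyGetD H_mat x []).length : Int) then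
        acc.insert (x, y) (acc.getD (x, y) 0 + v)
      else acc) acc) acc

def pbAcc (H_mat : List (List Int)) : PySem.Dict (Int × Int) Int :=
  (PySem.List.enumerate H_mat 0).foldl (fun acc p =>
    (PySem.List.enumerate p.2 0).foldl (fun acc q =>
      pbScatterCell H_mat acc p.1 q.1 q.2) acc) PySem.Dict.empty

def population_boundaries_alt (H_mat : List (List Int)) : List Int × List Int :=
  let acc := pbAcc H_mat
  (PySem.List.enumerate H_mat 0).foldl (fun st p =>
    (PySem.List.enumerate p.2 0).foldl (fun st q =>
      if q.2 = 0 ∧ acc.getD (p.1, q.1) 0 ≠ 0 then (st.1 ++ [p.1], st.2 ++ [q.1]) else st) st)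
    (([], []) : List Int × List Int)

-- ===== PRECONDITION & SPEC =====
-- Pre_ excludes exactly the ragged matrices on which A raises IndexError (a row of length ≥ 2
-- adjacent to a strictly shorter row makes A read past the shorter row's end).
def Pre_population_boundaries (H_mat : List (List Int)) : Prop :=
  ∀ i, (h : i < H_mat.length - 1) →
    (2 ≤ (H_mat[i]'(by omega)).length →
        (H_mat[i]'(by omega)).length ≤ (H_mat[i + 1]'(by omega)).length) ∧
    (2 ≤ (H_mat[i + 1]'(by omega)).length →
        (H_mat[i + 1]'(by omega)).length ≤ (H_mat[i]'(by omega)).length)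

instance (H_mat : List (List Int)) : Decidable (Pre_population_boundaries H_mat) := by
  unfold Pre_population_boundaries; infer_instance

def pvWitness_population_boundaries : List (List Int) := [[0, 1], [2, 0]]

def Spec_population_boundaries (H_mat : List (List Int)) (out : List Int × List Int) : Prop :=
  out = population_boundaries_alt H_mat

instance (H_mat : List (List Int)) (out : List Int × List Int) :
    Decidable (Spec_population_boundaries H_mat out) := by
  unfold Spec_population_boundaries; infer_instance

-- ===== CLAIM (what is proved, stated in full; the proofs are below) =====
def Claim_equal_population_boundaries : Prop :=
  ∀ (H_mat : List (List Int)), Dom_population_boundaries H_mat →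
    Pre_population_boundaries H_mat →
    Spec_population_boundaries H_mat (population_boundaries H_mat)

-- ===== LEMMAS AND PROOFS =====

-- the value scattered into (x, y), i.e. the in-bounds guarded entry of H
def pbT (H : List (List Int)) (x y : Int) : Int :=
  if 0 ≤ x ∧ x < (H.length : Int) ∧ 0 ≤ y ∧ y < ((PySem.List.pyGetD H x []).length : Int) then
    PySem.List.pyGetD (PySem.List.pyGetD H x []) y 0
  else 0

def pbInd (H : List (List Int)) (x y v : Int) (k : Int × Int) : Int :=
  if k = (x, y) ∧ 0 ≤ x ∧ x < (H.length : Int) ∧ 0 ≤ y ∧ y < ((PySem.List.pyGetD H x []).length : Int) then v else 0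

def pbDelta (H : List (List Int)) (i j v : Int) (k : Int × Int) : Int :=
  pbInd H (i - 1) (j - 1) v k + pbInd H (i - 1) (j + 1) v k +
  pbInd H (i + 1) (j - 1) v k + pbInd H (i + 1) (j + 1) v k

lemma pbStep (d : PySem.Dict (Int × Int) Int) (x y v : Int) (c : Prop) [Decidable c] (k : Int × Int) :
    (if c then d.insert (x, y) (d.getD (x, y) 0 + v) else d).getD k 0
      = d.getD k 0 + (if k = (x, y) ∧ c then v else 0) := by
  by_cases hc : c <;> by_cases hk : k = (x, y) <;>
    simp [hc, hk, PySem.Dict.getD_insert]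

lemma pbScatterCell_getD (H : List (List Int)) (d : PySem.Dict (Int × Int) Int)
    (i j v : Int) (k : Int × Int) :
    (pbScatterCell H d i j v).getD k 0 = d.getD k 0 + pbDelta H i j v k := by
  unfold pbScatterCell pbDelta pbInd
  simp only [List.foldl_cons, List.foldl_nil]
  rw [pbStep, pbStep, pbStep, pbStep]
  ring

lemma pb_getD_foldl {α : Type} (step : PySem.Dict (Int × Int) Int → α → PySem.Dict (Int × Int) Int)
    (delta : α → Int) (k : Int × Int)
    (h : ∀ d a, (step d a).getD k 0 = d.getD k 0 + delta a) :
    ∀ (L : List α) (d : PySem.Dict (Int × Int) Int),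
      (L.foldl step d).getD k 0 = d.getD k 0 + (L.map delta).sum := by
  intro L
  induction L with
  | nil => simp
  | cons a t ih =>
    intro d
    simp only [List.foldl_cons, List.map_cons, List.sum_cons, ih, h]
    ring

lemma pbAcc_getD (H : List (List Int)) (k : Int × Int) :
    (pbAcc H).getD k 0
      = ((PySem.List.enumerate H 0).map (fun p =>
          ((PySem.List.enumerate p.2 0).map (fun q => pbDelta H p.1 q.1 q.2 k)).sum)).sum := by
  unfold pbAcc
  rw [pb_getD_foldl _ (fun p => ((PySem.List.enumerate p.2 0).map (fun q => pbDelta H p.1 q.1 q.2 k)).sum) k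
        (fun d p => by
          rw [pb_getD_foldl _ (fun q => pbDelta H p.1 q.1 q.2 k) k
                (fun d q => pbScatterCell_getD H d p.1 q.1 q.2 k)])]
  rw [PySem.Dict.getD_empty]
  ring

lemma pb_sum_enumerate_pick {α : Type} (F : α → Int) (dflt : α) :
    ∀ (l : List α) (a s : Int),
      ((PySem.List.enumerate l s).map (fun p => if p.1 = a then F p.2 else 0)).sum
        = if s ≤ a ∧ a < s + (l.length : Int) then F (PySem.List.pyGetD l (a - s) dflt) else 0 := by
  intro l
  induction l with
  | nil => intro a s; simp [PySem.List.enumerate_nil]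
  | cons x t ih =>
    intro a s
    rw [PySem.List.enumerate_cons]
    simp only [List.map_cons, List.sum_cons, ih]
    by_cases hsa : s = a
    · subst hsa
      have h1 : ¬ (s + 1 ≤ s ∧ s < s + 1 + (t.length : Int)) := by omega
      have h2 : s ≤ s ∧ s < s + ((x :: t).length : Int) := by
        constructor
        · omega
        · simp only [List.length_cons]; push_cast; omega
      rw [if_pos h2, if_neg h1, if_pos rfl]
      rw [sub_self, PySem.List.pyGetD_zero_cons]
      ring
    · rw [if_neg hsa]
      by_cases h1 : s + 1 ≤ a ∧ a < s + 1 + (t.length : Int)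
      · have h2 : s ≤ a ∧ a < s + ((x :: t).length : Int) := by
          simp only [List.length_cons]; push_cast; omega
        rw [if_pos h1, if_pos h2]
        rw [PySem.List.pyGetD_eq_getElem t dflt (by omega) (by omega),
            PySem.List.pyGetD_eq_getElem (x :: t) dflt (by omega)
              (by simp only [List.length_cons]; push_cast; omega)]
        have hn : (a - s).toNat = (a - (s + 1)).toNat + 1 := by omega
        simp only [hn, List.getElem_cons_succ]
        ring
      · have h2 : ¬ (s ≤ a ∧ a < s + ((x :: t).length : Int)) := by
          simp only [List.length_cons]; push_cast; push_cast at h1; omega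
        rw [if_neg h1, if_neg h2]
        ring

lemma pb_sum_map_ite_const {α : Type} (P : Prop) [Decidable P] (X : α → Int) (l : List α) :
    (l.map (fun x => if P then X x else 0)).sum = if P then (l.map X).sum else 0 := by
  split_ifs <;> simp

lemma pbDoubleSum (H : List (List Int)) (a c : Int) :
    ((PySem.List.enumerate H 0).map (fun p =>
        ((PySem.List.enumerate p.2 0).map (fun q => if p.1 = a ∧ q.1 = c then q.2 else 0)).sum)).sum
      = pbT H a c := by
  simp only [ite_and]
  simp only [pb_sum_map_ite_const]
  rw [pb_sum_enumerate_pick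
        (fun row => ((PySem.List.enumerate row 0).map (fun q => if q.1 = c then q.2 else 0)).sum)
        ([] : List Int) H a 0]
  unfold pbT
  by_cases h1 : 0 ≤ a ∧ a < 0 + (H.length : Int)
  · rw [if_pos h1]
    rw [pb_sum_enumerate_pick (fun v => v) (0 : Int) (PySem.List.pyGetD H (a - 0) []) c 0]
    have ha0 : a - 0 = a := by ring
    rw [ha0]
    by_cases h2 : 0 ≤ c ∧ c < 0 + ((PySem.List.pyGetD H a []).length : Int)
    · rw [if_pos h2, if_pos (by omega)]
      have hc0 : c - 0 = c := by ring
      rw [hc0]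
    · rw [if_neg h2, if_neg (by omega)]
  · rw [if_neg h1, if_neg (by omega)]

lemma pbInd_at_cell (H : List (List Int)) (a b : Int)
    (ha : 0 ≤ a) (han : a < (H.length : Int))
    (hb : 0 ≤ b) (hbr : b < ((PySem.List.pyGetD H a []).length : Int))
    (x y v : Int) :
    pbInd H x y v (a, b) = if x = a ∧ y = b then v else 0 := by
  unfold pbInd
  have e : ((a, b) = (x, y) ∧ 0 ≤ x ∧ x < (H.length : Int) ∧ 0 ≤ y ∧ y < ((PySem.List.pyGetD H x []).length : Int))
      ↔ (x = a ∧ y = b) := by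
    constructor
    · rintro ⟨hp, -⟩
      rw [Prod.mk.injEq] at hp
      exact ⟨hp.1.symm, hp.2.symm⟩
    · rintro ⟨hx, hy⟩
      subst hx; subst hy
      exact ⟨rfl, ha, han, hb, hbr⟩
  rw [if_congr e rfl rfl]

lemma pbDelta_at_cell (H : List (List Int)) (a b : Int)
    (ha : 0 ≤ a) (han : a < (H.length : Int))
    (hb : 0 ≤ b) (hbr : b < ((PySem.List.pyGetD H a []).length : Int))
    (i j v : Int) :
    pbDelta H i j v (a, b)
      = (if i = a + 1 ∧ j = b + 1 then v else 0) + (if i = a + 1 ∧ j = b - 1 then v else 0)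
      + (if i = a - 1 ∧ j = b + 1 then v else 0) + (if i = a - 1 ∧ j = b - 1 then v else 0) := by
  unfold pbDelta
  rw [pbInd_at_cell H a b ha han hb hbr, pbInd_at_cell H a b ha han hb hbr,
      pbInd_at_cell H a b ha han hb hbr, pbInd_at_cell H a b ha han hb hbr]
  rw [if_congr (show (i - 1 = a ∧ j - 1 = b) ↔ (i = a + 1 ∧ j = b + 1) by omega) rfl rfl,
      if_congr (show (i - 1 = a ∧ j + 1 = b) ↔ (i = a + 1 ∧ j = b - 1) by omega) rfl rfl,
      if_congr (show (i + 1 = a ∧ j - 1 = b) ↔ (i = a - 1 ∧ j = b + 1) by omega) rfl rfl,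
      if_congr (show (i + 1 = a ∧ j + 1 = b) ↔ (i = a - 1 ∧ j = b - 1) by omega) rfl rfl]

lemma pbAcc_at_cell (H : List (List Int)) (a b : Int)
    (ha : 0 ≤ a) (han : a < (H.length : Int))
    (hb : 0 ≤ b) (hbr : b < ((PySem.List.pyGetD H a []).length : Int)) :
    (pbAcc H).getD (a, b) 0
      = pbT H (a + 1) (b + 1) + pbT H (a + 1) (b - 1) + pbT H (a - 1) (b + 1) + pbT H (a - 1) (b - 1) := by
  rw [pbAcc_getD]
  simp only [pbDelta_at_cell H a b ha han hb hbr]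
  simp only [PySem.List.sum_map_add_int]
  rw [pbDoubleSum, pbDoubleSum, pbDoubleSum, pbDoubleSum]

lemma pbHSum_eq (H : List (List Int)) (i j d u l r : Int) :
    pbHSum H i j [d, 0, u] [l, 0, r]
      = (if d ≠ 0 ∧ l ≠ 0 then PySem.List.pyGetD (PySem.List.pyGetD H (i + d) []) (j + l) 0 else 0)
      + (if d ≠ 0 ∧ r ≠ 0 then PySem.List.pyGetD (PySem.List.pyGetD H (i + d) []) (j + r) 0 else 0)
      + (if u ≠ 0 ∧ l ≠ 0 then PySem.List.pyGetD (PySem.List.pyGetD H (i + u) []) (j + l) 0 else 0)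
      + (if u ≠ 0 ∧ r ≠ 0 then PySem.List.pyGetD (PySem.List.pyGetD H (i + u) []) (j + r) 0 else 0) := by
  unfold pbHSum
  simp only [List.foldl_cons, List.foldl_nil, ne_eq, not_true_eq_false, false_and, and_false,
    if_false]
  split_ifs <;> ring

lemma pbHSum_eq' (H : List (List Int)) (i j n Li : Int) :
    pbHSum H i j [if i ≠ 0 then -1 else 0, 0, if i ≠ n - 1 then 1 else 0]
        [if j ≠ 0 then -1 else 0, 0, if j ≠ Li - 1 then 1 else 0]
      = (if i ≠ 0 ∧ j ≠ 0 then PySem.List.pyGetD (PySem.List.pyGetD H (i - 1) []) (j - 1) 0 else 0)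
      + (if i ≠ 0 ∧ j ≠ Li - 1 then PySem.List.pyGetD (PySem.List.pyGetD H (i - 1) []) (j + 1) 0 else 0)
      + (if i ≠ n - 1 ∧ j ≠ 0 then PySem.List.pyGetD (PySem.List.pyGetD H (i + 1) []) (j - 1) 0 else 0)
      + (if i ≠ n - 1 ∧ j ≠ Li - 1 then PySem.List.pyGetD (PySem.List.pyGetD H (i + 1) []) (j + 1) 0 else 0) := by
  rw [pbHSum_eq]
  by_cases hi0 : i = 0 <;> by_cases hin : i = n - 1 <;> by_cases hj0 : j = 0 <;>
    by_cases hjL : j = Li - 1 <;>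
    simp [hi0, hin, hj0, hjL, sub_eq_add_neg] <;> split_ifs <;> first | rfl | omega

lemma pbTerm_eq (H : List (List Int)) (i j x y : Int)
    (hj : 0 ≤ j) (hjL : j < ((PySem.List.pyGetD H i []).length : Int))
    (hyr : y = j - 1 ∨ y = j + 1)
    (hok : 0 ≤ x → x < (H.length : Int) →
      (2 ≤ ((PySem.List.pyGetD H i []).length : Int) →
          ((PySem.List.pyGetD H i []).length : Int) ≤ ((PySem.List.pyGetD H x []).length : Int)) ∧
      (2 ≤ ((PySem.List.pyGetD H x []).length : Int) →
          ((PySem.List.pyGetD H x []).length : Int) ≤ ((PySem.List.pyGetD H i []).length : Int)))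
    (bi bj : Prop) [Decidable bi] [Decidable bj]
    (hbi : bi ↔ (0 ≤ x ∧ x < (H.length : Int)))
    (hbj : bj ↔ (0 ≤ y ∧ y < ((PySem.List.pyGetD H i []).length : Int))) :
    (if bi ∧ bj then PySem.List.pyGetD (PySem.List.pyGetD H x []) y 0 else 0) = pbT H x y := by
  unfold pbT
  by_cases hBi : bi
  · by_cases hBj : bj
    · rw [if_pos ⟨hBi, hBj⟩, if_pos]
      obtain ⟨hx0, hxn⟩ := hbi.mp hBi
      obtain ⟨hy0, hyL⟩ := hbj.mp hBj
      obtain ⟨f1, f2⟩ := hok hx0 hxn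
      refine ⟨hx0, hxn, hy0, ?_⟩
      rcases hyr with h | h <;> omega
    · rw [if_neg (fun h => hBj h.2), if_neg]
      obtain ⟨hx0, hxn⟩ := hbi.mp hBi
      obtain ⟨f1, f2⟩ := hok hx0 hxn
      rw [hbj] at hBj
      rintro ⟨-, -, hy0, hyL⟩
      rcases hyr with h | h <;> omega
  · rw [if_neg (fun h => hBi h.1), if_neg]
    rw [hbi] at hBi
    rintro ⟨hx0, hxn, -⟩
    exact hBi ⟨hx0, hxn⟩

lemma pb_percell (H : List (List Int)) (hpre : Pre_population_boundaries H)
    (k m : Nat) (hk : k < H.length) (hm : m < H[k].length) :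
    pbHSum H (k : Int) (m : Int)
        [if (k : Int) ≠ 0 then -1 else 0, 0, if (k : Int) ≠ (H.length : Int) - 1 then 1 else 0]
        [if (m : Int) ≠ 0 then -1 else 0, 0, if (m : Int) ≠ (H[k].length : Int) - 1 then 1 else 0]
      = (pbAcc H).getD ((k : Int), (m : Int)) 0 := by
  have hkn : (k : Int) < (H.length : Int) := by exact_mod_cast hk
  have hrowk : PySem.List.pyGetD H (k : Int) [] = H[k] := by
    rw [PySem.List.pyGetD_eq_getElem H [] (by omega) hkn]
    simp
  have hmL : (m : Int) < ((PySem.List.pyGetD H (k : Int) []).length : Int) := by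
    rw [hrowk]; exact_mod_cast hm
  have hokd : 0 ≤ (k : Int) - 1 → (k : Int) - 1 < (H.length : Int) →
      (2 ≤ ((PySem.List.pyGetD H (k : Int) []).length : Int) →
          ((PySem.List.pyGetD H (k : Int) []).length : Int) ≤ ((PySem.List.pyGetD H ((k : Int) - 1) []).length : Int)) ∧
      (2 ≤ ((PySem.List.pyGetD H ((k : Int) - 1) []).length : Int) →
          ((PySem.List.pyGetD H ((k : Int) - 1) []).length : Int) ≤ ((PySem.List.pyGetD H (k : Int) []).length : Int)) := by
    intro h1 _h2
    have hk1 : 1 ≤ k := by omega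
    have hget : PySem.List.pyGetD H ((k : Int) - 1) [] = H[k - 1]'(by omega) := by
      rw [PySem.List.pyGetD_eq_getElem H [] (by omega) (by omega)]
      simp only [show ((k : Int) - 1).toNat = k - 1 from by omega]
    have hcc := hpre (k - 1) (by omega)
    have hidx : k - 1 + 1 = k := by omega
    simp only [hidx] at hcc
    obtain ⟨c1, c2⟩ := hcc
    rw [hget, hrowk]
    constructor <;> intro hh
    · exact_mod_cast c2 (by exact_mod_cast hh)
    · exact_mod_cast c1 (by exact_mod_cast hh)
  have hoku : 0 ≤ (k : Int) + 1 → (k : Int) + 1 < (H.length : Int) →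
      (2 ≤ ((PySem.List.pyGetD H (k : Int) []).length : Int) →
          ((PySem.List.pyGetD H (k : Int) []).length : Int) ≤ ((PySem.List.pyGetD H ((k : Int) + 1) []).length : Int)) ∧
      (2 ≤ ((PySem.List.pyGetD H ((k : Int) + 1) []).length : Int) →
          ((PySem.List.pyGetD H ((k : Int) + 1) []).length : Int) ≤ ((PySem.List.pyGetD H (k : Int) []).length : Int)) := by
    intro _h1 h2
    have hget : PySem.List.pyGetD H ((k : Int) + 1) [] = H[k + 1]'(by omega) := by
      rw [PySem.List.pyGetD_eq_getElem H [] (by omega) h2]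
      simp only [show ((k : Int) + 1).toNat = k + 1 from by omega]
    have hcc := hpre k (by omega)
    obtain ⟨c1, c2⟩ := hcc
    rw [hget, hrowk]
    constructor <;> intro hh
    · exact_mod_cast c1 (by exact_mod_cast hh)
    · exact_mod_cast c2 (by exact_mod_cast hh)
  rw [pbHSum_eq' H (k : Int) (m : Int) (H.length : Int) ((H[k].length : Int))]
  rw [pbAcc_at_cell H (k : Int) (m : Int) (by omega) hkn (by omega) hmL]
  rw [pbTerm_eq H (k : Int) (m : Int) ((k : Int) - 1) ((m : Int) - 1) (by omega) hmL
        (Or.inl rfl) hokd ((k : Int) ≠ 0) ((m : Int) ≠ 0)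
        (by omega) (by rw [hrowk]; constructor <;> intro <;> [constructor; skip] <;> omega)]
  rw [pbTerm_eq H (k : Int) (m : Int) ((k : Int) - 1) ((m : Int) + 1) (by omega) hmL
        (Or.inr rfl) hokd ((k : Int) ≠ 0) ((m : Int) ≠ (H[k].length : Int) - 1)
        (by omega) (by rw [hrowk]; rw [hrowk] at hmL; constructor <;> intro <;> [constructor; skip] <;> omega)]
  rw [pbTerm_eq H (k : Int) (m : Int) ((k : Int) + 1) ((m : Int) - 1) (by omega) hmL
        (Or.inl rfl) hoku ((k : Int) ≠ (H.length : Int) - 1) ((m : Int) ≠ 0)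
        (by omega) (by rw [hrowk]; constructor <;> intro <;> [constructor; skip] <;> omega)]
  rw [pbTerm_eq H (k : Int) (m : Int) ((k : Int) + 1) ((m : Int) + 1) (by omega) hmL
        (Or.inr rfl) hoku ((k : Int) ≠ (H.length : Int) - 1) ((m : Int) ≠ (H[k].length : Int) - 1)
        (by omega) (by rw [hrowk]; rw [hrowk] at hmL; constructor <;> intro <;> [constructor; skip] <;> omega)]
  ring

theorem population_boundaries_spec : Claim_equal_population_boundaries := by
  intro H _hdom hpre
  unfold Spec_population_boundaries population_boundaries population_boundaries_alt
  apply PySem.List.foldl_congr_mem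
  intro st p hp
  obtain ⟨k, hk, hpk⟩ := (PySem.List.mem_enumerate_iff H 0 p).mp hp
  subst hpk
  apply PySem.List.foldl_congr_mem
  intro st' q hq
  obtain ⟨m, hm, hqm⟩ := (PySem.List.mem_enumerate_iff _ 0 q).mp hq
  subst hqm
  dsimp only
  simp only [zero_add]
  rw [pb_percell H hpre k m hk (by simpa using hm)]
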